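-- pv_equiv track=rewrite | github.com/catsplus/radiograb | backend/services/content_categorization_service.py | _detect_syndicated_show
-- ===== SOURCE A (Python) =====
-- from typing import Dict, List, Optional, Tuple
--
-- def _detect_syndicated_show(show: Dict) -> bool:
--     """
--     Detect if a show is syndicated (usually requires stream-only mode)
--     """
--     syndicated_indicators = [
--         'npr', 'national public radio', 'pbs', 'public radio',
--         'this american life', 'fresh air', 'all things considered',
--         'marketplace', 'planet money', 'ted radio hour',
--         'bbc', 'cbc', 'syndicated'
--     ]
--
--     text_to_check = f"{show['name']} {show.get('description', '')}".lower()
--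
--     for indicator in syndicated_indicators:
--         if indicator in text_to_check:
--             return True
--
--     return False
-- ===== SOURCE B (Python) =====
-- def _detect_syndicated_show(show):
--     """Position-major scan with a hand-written character comparator: walk the text
--     once and at each position compare each indicator char-by-char, instead of one
--     full substring 'in' scan per indicator."""
--     indicators = [
--         'npr', 'national public radio', 'pbs', 'public radio',
--         'this american life', 'fresh air', 'all things considered',
--         'marketplace', 'planet money', 'ted radio hour',
--         'bbc', 'cbc', 'syndicated'
--     ]
--     text = (show['name'] + ' ' + show.get('description', '')).lower()
--     n = len(text)
--
--     def matches_at(pat, i):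
--         for k in range(len(pat)):
--             if i + k >= n or text[i + k] != pat[k]:
--                 return False
--         return True
--
--     i = 0
--     while i < n:
--         for ind in indicators:
--             if matches_at(ind, i):
--                 return True
--         i += 1
--     return False
-- ===== Notes on version B (the rewrite author's own statement) =====
-- stated objective: alternative
-- what changed: A loops over the 13 indicators and runs a full substring 'in' scan of the text for each; B walks the text left-to-right once and at each position compares each indicator character-by-character with a hand-written prefix matcher, a position-major traversal replacing indicator-major library substring scans.
import Mathlib
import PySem

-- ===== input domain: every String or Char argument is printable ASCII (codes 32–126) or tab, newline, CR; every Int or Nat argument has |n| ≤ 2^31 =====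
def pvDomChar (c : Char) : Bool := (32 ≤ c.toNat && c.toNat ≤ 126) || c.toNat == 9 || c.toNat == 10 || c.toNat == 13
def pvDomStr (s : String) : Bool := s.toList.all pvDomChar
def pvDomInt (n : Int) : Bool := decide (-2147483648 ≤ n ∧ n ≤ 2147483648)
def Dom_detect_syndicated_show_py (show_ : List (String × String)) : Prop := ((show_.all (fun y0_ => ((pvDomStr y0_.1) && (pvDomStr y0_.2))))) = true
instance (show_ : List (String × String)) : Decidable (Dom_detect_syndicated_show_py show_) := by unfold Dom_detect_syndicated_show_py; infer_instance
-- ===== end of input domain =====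

-- B replaces A's indicator-major library substring scans by a single position-major
-- left-to-right walk over the text with a hand-written char-by-char prefix matcher
-- (alternative decomposition, same cost class).


-- ===== PORT A =====
-- the literal indicator list A writes out verbatim
def pvIndicatorsA : List (List Char) :=
  ["npr".toList, "national public radio".toList, "pbs".toList, "public radio".toList,
   "this american life".toList, "fresh air".toList, "all things considered".toList,
   "marketplace".toList, "planet money".toList, "ted radio hour".toList,
   "bbc".toList, "cbc".toList, "syndicated".toList]

-- first-match association-list lookup (dict lookup under the type convention)
def pvLookupA (d : List (String × String)) (k : String) : Option String :=
  (d.find? (fun p => p.1 == k)).map (·.2)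

-- text_to_check = f"{show['name']} {show.get('description', '')}".lower(), as a char list
def pvTextA (show_ : List (String × String)) : List Char :=
  PySem.Chars.lower (((pvLookupA show_ "name").getD "").toList ++ ' ' ::
    ((pvLookupA show_ "description").getD "").toList)

-- for indicator in …: if indicator in text: return True / return False
def detect_syndicated_show_py (show_ : List (String × String)) : Bool :=
  pvIndicatorsA.any (fun ind => PySem.Chars.isIn ind (pvTextA show_))

-- ===== PORT B =====
-- B's indicator tuple (same literal strings, B's own definition)
def pvIndicatorsB : List (List Char) :=
  ["npr".toList, "national public radio".toList, "pbs".toList, "public radio".toList,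
   "this american life".toList, "fresh air".toList, "all things considered".toList,
   "marketplace".toList, "planet money".toList, "ted radio hour".toList,
   "bbc".toList, "cbc".toList, "syndicated".toList]

-- B's own dict lookup, written as explicit first-match recursion
def pvGetB : List (String × String) → String → Option String
  | [], _ => none
  | (k, v) :: rest, key => if k == key then some v else pvGetB rest key

-- text = (show['name'] + ' ' + show.get('description', '')).lower()
def pvTextB (show_ : List (String × String)) : List Char :=
  PySem.Chars.lower (((pvGetB show_ "name").getD "").toList ++ ' ' ::
    ((pvGetB show_ "description").getD "").toList)

-- matches_at(pat, i): compare pat char-by-char against the text from position i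
-- (here: against the suffix of the text), returning False on mismatch or text end
def pvMatchB : List Char → List Char → Bool
  | [], _ => true
  | _ :: _, [] => false
  | p :: ps, c :: cs => p == c && pvMatchB ps cs

-- inner 'for ind in indicators' loop at one position
def pvAnyHereB : List (List Char) → List Char → Bool
  | [], _ => false
  | ind :: rest, suf => pvMatchB ind suf || pvAnyHereB rest suf

-- outer 'while i < n' loop: walk the text suffix by suffix
def pvScanB : List Char → Bool
  | [] => false
  | c :: rest => pvAnyHereB pvIndicatorsB (c :: rest) || pvScanB rest

def detect_syndicated_show_py_alt (show_ : List (String × String)) : Bool :=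
  pvScanB (pvTextB show_)

-- ===== PRECONDITION & SPEC =====
-- A raises KeyError when the dict has no 'name' key; excluded.
def Pre_detect_syndicated_show_py (show_ : List (String × String)) : Prop :=
  (pvLookupA show_ "name").isSome = true
instance (show_ : List (String × String)) : Decidable (Pre_detect_syndicated_show_py show_) := by
  unfold Pre_detect_syndicated_show_py; infer_instance

def pvWitness_detect_syndicated_show_py : (List (String × String)) := [("name", "NPR News")]

def Spec_detect_syndicated_show_py (show_ : List (String × String)) (out : Bool) : Prop := out = detect_syndicated_show_py_alt show_
instance (show_ : List (String × String)) (out : Bool) : Decidable (Spec_detect_syndicated_show_py show_ out) := by unfold Spec_detect_syndicated_show_py; infer_instance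

-- ===== CLAIM (what is proved, stated in full; the proofs are below) =====
def Claim_equal_detect_syndicated_show_py : Prop := ∀ (show_ : List (String × String)), Dom_detect_syndicated_show_py show_ → Pre_detect_syndicated_show_py show_ → Spec_detect_syndicated_show_py show_ (detect_syndicated_show_py show_)

-- ===== LEMMAS AND PROOFS =====

-- B's lookup computes the same first match as A's
lemma pvGetB_eq (d : List (String × String)) (k : String) : pvGetB d k = pvLookupA d k := by
  induction d with
  | nil => rfl
  | cons p rest ih =>
    obtain ⟨a, b⟩ := p
    simp only [pvGetB, pvLookupA, List.find?]
    by_cases h : a == k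
    · simp [h]
    · simpa [h, pvLookupA] using ih

lemma pvTextB_eq (show_ : List (String × String)) : pvTextB show_ = pvTextA show_ := by
  simp only [pvTextB, pvTextA, pvGetB_eq]

-- the char-by-char matcher decides the prefix relation
lemma pvMatchB_iff (p t : List Char) : pvMatchB p t = true ↔ p <+: t := by
  induction p generalizing t with
  | nil => simp [pvMatchB]
  | cons x xs ih =>
    cases t with
    | nil => simp [pvMatchB]
    | cons c cs =>
      simp only [pvMatchB, Bool.and_eq_true, beq_iff_eq, ih, List.cons_prefix_cons]

lemma pvAnyHereB_iff (inds : List (List Char)) (suf : List Char) :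
    pvAnyHereB inds suf = true ↔ ∃ ind ∈ inds, ind <+: suf := by
  induction inds with
  | nil => simp [pvAnyHereB]
  | cons i rest ih => simp [pvAnyHereB, pvMatchB_iff, ih]

-- every indicator is nonempty
lemma pvIndicatorsB_ne_nil : ∀ ind ∈ pvIndicatorsB, ind ≠ [] := by decide

-- B's position-major scan finds a match iff some indicator occurs as a substring
lemma pvScanB_iff (text : List Char) :
    pvScanB text = true ↔ ∃ ind ∈ pvIndicatorsB, PySem.Chars.isIn ind text = true := by
  induction text with
  | nil =>
    simp only [pvScanB]
    constructor
    · intro h; cases h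
    · rintro ⟨ind, hmem, hin⟩
      obtain ⟨j, hpre⟩ := (PySem.Chars.exists_prefix_drop_iff_isIn ind []).mpr hin
      simp only [List.drop_nil] at hpre
      exact absurd (List.prefix_nil.mp hpre) (pvIndicatorsB_ne_nil ind hmem)
  | cons c cs ih =>
    simp only [pvScanB, Bool.or_eq_true, pvAnyHereB_iff, ih]
    constructor
    · rintro (⟨ind, hmem, hpre⟩ | ⟨ind, hmem, hin⟩)
      · exact ⟨ind, hmem, (PySem.Chars.exists_prefix_drop_iff_isIn ind (c :: cs)).mp ⟨0, hpre⟩⟩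
      · obtain ⟨j, hpre⟩ := (PySem.Chars.exists_prefix_drop_iff_isIn ind cs).mpr hin
        exact ⟨ind, hmem, (PySem.Chars.exists_prefix_drop_iff_isIn ind (c :: cs)).mp
          ⟨j + 1, by simpa using hpre⟩⟩
    · rintro ⟨ind, hmem, hin⟩
      obtain ⟨j, hpre⟩ := (PySem.Chars.exists_prefix_drop_iff_isIn ind (c :: cs)).mpr hin
      cases j with
      | zero => exact Or.inl ⟨ind, hmem, by simpa using hpre⟩
      | succ k =>
        exact Or.inr ⟨ind, hmem,
          (PySem.Chars.exists_prefix_drop_iff_isIn ind cs).mp ⟨k, by simpa using hpre⟩⟩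

-- ===== VERDICT (by name: the statement is the Claim_ definition above) =====
theorem detect_syndicated_show_py_spec : Claim_equal_detect_syndicated_show_py := by
  intro show_ _ _
  unfold Spec_detect_syndicated_show_py detect_syndicated_show_py detect_syndicated_show_py_alt
  rw [pvTextB_eq]
  apply Bool.eq_iff_iff.mpr
  rw [pvScanB_iff (pvTextA show_)]
  simp only [List.any_eq_true]
  rfl
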